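-- pv_equiv track=rewrite | github.com/BrayanNarvaez-25/bdd | Python/Parte 6/transporte.py | resolverProblema
-- ===== SOURCE A (Python) =====
-- def resolverProblema(listaO, listaD):
--     movimientos = []
--
--     for indice1 in range(len(listaD)):
--         for indice2 in range(len(listaO)):
--             if listaD[indice1] == 0:
--                 break
--
--             valorDestino = listaD[indice1]
--             valorOrigen = listaO[indice2]
--
--             if valorOrigen == 0:
--                 continue
--
--             cantidadMovimiento = min(valorOrigen,valorDestino)
--
--             if cantidadMovimiento > 0:
--                 registro = f"{indice2} - {indice1} - {cantidadMovimiento}"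
--                 movimientos.append(registro)
--
--                 listaO[indice2] -= cantidadMovimiento
--                 listaD[indice1] -= cantidadMovimiento
--     return movimientos
-- ===== SOURCE B (Python) =====
-- def resolverProblema(listaO, listaD):
--     movimientos = []
--     j = 0
--     n = len(listaO)
--     for i, d in enumerate(listaD):
--         while d > 0 and j < n:
--             o = listaO[j]
--             if o <= 0:
--                 j += 1
--             elif o <= d:
--                 movimientos.append(f"{j} - {i} - {o}")
--                 listaO[j] = 0
--                 d -= o
--                 j += 1
--             else:
--                 movimientos.append(f"{j} - {i} - {d}")
--                 listaO[j] = o - d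
--                 d = 0
--         listaD[i] = d
--     return movimientos
-- ===== Notes on version B (the rewrite author's own statement) =====
-- stated objective: faster
-- what changed: Replaced A's full rescan of all origins for every destination (nested for-loops, O(n*m)) by a single two-pointer sweep that keeps a persistent origin pointer, valid because origins left behind are always <= 0 and can never move again.
import Mathlib
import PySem

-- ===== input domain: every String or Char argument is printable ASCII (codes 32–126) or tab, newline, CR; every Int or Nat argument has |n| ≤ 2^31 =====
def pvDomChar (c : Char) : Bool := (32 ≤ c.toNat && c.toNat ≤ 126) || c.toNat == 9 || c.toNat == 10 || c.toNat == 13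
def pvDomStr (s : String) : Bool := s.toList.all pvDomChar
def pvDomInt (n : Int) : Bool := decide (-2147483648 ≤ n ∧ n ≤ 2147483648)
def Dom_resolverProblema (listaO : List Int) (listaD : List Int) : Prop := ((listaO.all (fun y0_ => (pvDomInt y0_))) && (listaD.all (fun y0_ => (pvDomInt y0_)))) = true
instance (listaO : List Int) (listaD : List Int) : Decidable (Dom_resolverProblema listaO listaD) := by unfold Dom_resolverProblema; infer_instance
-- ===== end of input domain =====

-- B replaces A's per-destination rescan of all origins by a single two-pointer sweep; the timing
-- run measures the speed-up.  A mutates its arguments in place (B performs the same mutations);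
-- the equivalence proved here is about the RETURN value only.

-- f"{indice2} - {indice1} - {cantidadMovimiento}" (both Pythons build the same f-string)
def pvFmt (j i : Nat) (c : Int) : String :=
  PySem.Int.toStr (Int.ofNat j) ++ " - " ++ PySem.Int.toStr (Int.ofNat i) ++ " - " ++ PySem.Int.toStr c

-- ===== PORT A =====
-- inner 'for indice2 in range(n)' with break/continue; n = len(listaO), evaluated at loop entry
def innA (n i : Nat) (j : Nat) (lo ld : List Int) (m : List String) :
    List Int × List Int × List String :=
  if _h : j < n then
    if ld.getD i 0 = 0 then (lo, ld, m)
    else if lo.getD j 0 = 0 then innA n i (j+1) lo ld m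
    else if 0 < min (lo.getD j 0) (ld.getD i 0) then
      innA n i (j+1) (lo.set j (lo.getD j 0 - min (lo.getD j 0) (ld.getD i 0)))
        (ld.set i (ld.getD i 0 - min (lo.getD j 0) (ld.getD i 0)))
        (m ++ [pvFmt j i (min (lo.getD j 0) (ld.getD i 0))])
    else innA n i (j+1) lo ld m
  else (lo, ld, m)
termination_by n - j

-- outer 'for indice1 in range(nD)'; nD = len(listaD), evaluated once
def outA (nD i : Nat) (lo ld : List Int) (m : List String) : List String :=
  if _h : i < nD then
    let r := innA lo.length i 0 lo ld m
    outA nD (i+1) r.1 r.2.1 r.2.2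
  else m
termination_by nD - i

def resolverProblema (listaO : List Int) (listaD : List Int) : List String :=
  outA listaD.length 0 listaO listaD []

-- ===== PORT B =====
-- 'while d > 0 and j < n' of Source B; returns (listaO, j, d, movimientos) after the loop
def innB (n i : Nat) (lo : List Int) (j : Nat) (d : Int) (m : List String) :
    List Int × Nat × Int × List String :=
  if _h : 0 < d ∧ j < n then
    if lo.getD j 0 ≤ 0 then innB n i lo (j+1) d m
    else if lo.getD j 0 ≤ d then
      innB n i (lo.set j 0) (j+1) (d - lo.getD j 0) (m ++ [pvFmt j i (lo.getD j 0)])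
    else (lo.set j (lo.getD j 0 - d), j, 0, m ++ [pvFmt j i d])
  else (lo, j, d, m)
termination_by n - j

-- 'for i, d in enumerate(listaD)' of Source B
def outB (lo : List Int) (j i : Nat) (ds : List Int) (m : List String) : List String :=
  match ds with
  | [] => m
  | d :: rest =>
    let r := innB lo.length i lo j d m
    outB r.1 r.2.1 (i+1) rest r.2.2.2

def resolverProblema_alt (listaO : List Int) (listaD : List Int) : List String :=
  outB listaO 0 0 listaD []

-- ===== PRECONDITION & SPEC =====
def Spec_resolverProblema (listaO : List Int) (listaD : List Int) (out : List String) : Prop := out = resolverProblema_alt listaO listaD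
instance (listaO : List Int) (listaD : List Int) (out : List String) : Decidable (Spec_resolverProblema listaO listaD out) := by unfold Spec_resolverProblema; infer_instance

-- ===== CLAIM (what is proved, stated in full; the proofs are below) =====
def Claim_equal_resolverProblema : Prop := ∀ (listaO : List Int) (listaD : List Int), Dom_resolverProblema listaO listaD → Spec_resolverProblema listaO listaD (resolverProblema listaO listaD)

-- ===== LEMMAS AND PROOFS =====
theorem innA_zero (n i j : Nat) (lo ld : List Int) (m : List String)
    (hd : ld.getD i 0 = 0) :
    innA n i j lo ld m = (lo, ld, m) := by
  rw [innA, if_pos hd]; split <;> rfl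


theorem innA_skip (n i j : Nat) (lo ld : List Int) (m : List String)
    (hj : j < n) (ho : lo.getD j 0 ≤ 0) :
    innA n i j lo ld m = innA n i (j+1) lo ld m := by
  rw [innA, dif_pos hj]
  have h1 : min (lo.getD j 0) (ld.getD i 0) ≤ lo.getD j 0 := min_le_left _ _
  split_ifs with hd ho0 hc
  · exact (innA_zero _ _ _ _ _ _ hd).symm
  · rfl
  · omega
  · rfl

theorem innA_skip_many (n i : Nat) (j0 : Nat) (lo ld : List Int) (m : List String)
    (hj : j0 ≤ n) (ho : ∀ k < j0, lo.getD k 0 ≤ 0) :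
    innA n i 0 lo ld m = innA n i j0 lo ld m := by
  induction j0 with
  | zero => rfl
  | succ t ih =>
    rw [ih (by omega) (fun k hk => ho k (by omega)),
        innA_skip _ _ _ _ _ _ (by omega) (ho t (by omega))]

theorem innA_neg_aux (n i : Nat) : ∀ (fuel j : Nat) (lo ld : List Int) (m : List String),
    n - j = fuel → ld.getD i 0 < 0 → innA n i j lo ld m = (lo, ld, m) := by
  intro fuel
  induction fuel with
  | zero => intro j lo ld m hf hd; rw [innA, dif_neg (by omega)]
  | succ t ih =>
    intro j lo ld m hf hd
    rw [innA, dif_pos (by omega)]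
    have h1 : min (lo.getD j 0) (ld.getD i 0) ≤ ld.getD i 0 := min_le_right _ _
    split_ifs with hd0 ho0 hc
    · rfl
    · exact ih _ _ _ _ (by omega) hd
    · omega
    · exact ih _ _ _ _ (by omega) hd

theorem innA_neg (n i j : Nat) (lo ld : List Int) (m : List String)
    (hd : ld.getD i 0 < 0) : innA n i j lo ld m = (lo, ld, m) :=
  innA_neg_aux n i (n - j) j lo ld m rfl hd
theorem getD_set_self (l : List Int) (i : Nat) (x : Int) (hi : i < l.length) :
    (l.set i x).getD i 0 = x := by
  simp [List.getD_eq_getElem?_getD, hi]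

theorem set_getD_self (l : List Int) (i : Nat) (hi : i < l.length) :
    l.set i (l.getD i 0) = l := by
  simp [hi]
theorem innA_eq_innB_aux (n i : Nat) : ∀ (fuel j : Nat) (lo ld : List Int) (m : List String),
    n - j = fuel → i < ld.length →
    innA n i j lo ld m =
      ((innB n i lo j (ld.getD i 0) m).1,
       ld.set i (innB n i lo j (ld.getD i 0) m).2.2.1,
       (innB n i lo j (ld.getD i 0) m).2.2.2) := by
  intro fuel
  induction fuel with
  | zero =>
    intro j lo ld m hf hi
    rw [innA, dif_neg (by omega), innB, dif_neg (by omega), set_getD_self ld i hi]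
  | succ t ih =>
    intro j lo ld m hf hi
    rcases lt_trichotomy (ld.getD i 0) 0 with hd | hd | hd
    · rw [innA_neg _ _ _ _ _ _ hd, innB, dif_neg (by omega), set_getD_self ld i hi]
    · rw [innA_zero _ _ _ _ _ _ hd, innB, dif_neg (by omega), set_getD_self ld i hi]
    · -- d > 0
      rw [innA, dif_pos (by omega), innB, dif_pos (And.intro hd (by omega)),
          if_neg (show ¬ ld.getD i 0 = 0 by omega)]
      rcases lt_trichotomy (lo.getD j 0) 0 with ho | ho | ho
      · -- o < 0 : A skips (min o d = o < 0), B skips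
        have hmin : min (lo.getD j 0) (ld.getD i 0) = lo.getD j 0 := min_eq_left (by omega)
        rw [if_neg (show ¬ lo.getD j 0 = 0 by omega), hmin,
            if_neg (show ¬ (0:Int) < lo.getD j 0 by omega),
            if_pos (show lo.getD j 0 ≤ 0 by omega)]
        exact ih _ _ _ _ (by omega) hi
      · -- o = 0
        rw [if_pos ho, if_pos (show lo.getD j 0 ≤ 0 by omega)]
        exact ih _ _ _ _ (by omega) hi
      · -- o > 0
        rw [if_neg (show ¬ lo.getD j 0 = 0 by omega),
            if_neg (show ¬ lo.getD j 0 ≤ 0 by omega)]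
        by_cases hod : lo.getD j 0 ≤ ld.getD i 0
        · have hmin : min (lo.getD j 0) (ld.getD i 0) = lo.getD j 0 := min_eq_left hod
          rw [hmin, if_pos (show (0:Int) < lo.getD j 0 by omega), if_pos hod,
              sub_self (lo.getD j 0)]
          rw [ih (j+1) (lo.set j 0) (ld.set i (ld.getD i 0 - lo.getD j 0))
              (m ++ [pvFmt j i (lo.getD j 0)]) (by omega) (by simpa using hi),
              getD_set_self _ _ _ hi]
          rw [List.set_set]
        · have hmin : min (lo.getD j 0) (ld.getD i 0) = ld.getD i 0 := min_eq_right (by omega)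
          rw [hmin, if_pos (show (0:Int) < ld.getD i 0 by omega), if_neg hod,
              sub_self (ld.getD i 0),
              innA_zero _ _ _ _ _ _ (getD_set_self ld i 0 hi)]

theorem innA_eq_innB (n i : Nat) (j : Nat) (lo ld : List Int) (m : List String)
    (hi : i < ld.length) :
    innA n i j lo ld m =
      ((innB n i lo j (ld.getD i 0) m).1,
       ld.set i (innB n i lo j (ld.getD i 0) m).2.2.1,
       (innB n i lo j (ld.getD i 0) m).2.2.2) :=
  innA_eq_innB_aux n i (n - j) j lo ld m rfl hi

theorem drop_set_of_lt (l : List Int) (i n : Nat) (x : Int) (h : i < n) :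
    (l.set i x).drop n = l.drop n := by
  apply List.ext_getElem?
  intro k
  simp [List.getElem?_drop, List.getElem?_set]
  omega

theorem innB_inv (n i : Nat) : ∀ (fuel j : Nat) (lo : List Int) (d : Int) (m : List String),
    n - j = fuel → (∀ k < j, lo.getD k 0 ≤ 0) → j ≤ n →
    (innB n i lo j d m).1.length = lo.length ∧
    (innB n i lo j d m).2.1 ≤ n ∧
    (∀ k < (innB n i lo j d m).2.1, (innB n i lo j d m).1.getD k 0 ≤ 0) := by
  intro fuel
  induction fuel with
  | zero =>
    intro j lo d m hf hpre hj
    rw [innB, dif_neg (by omega)]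
    exact ⟨rfl, hj, hpre⟩
  | succ t ih =>
    intro j lo d m hf hpre hj
    rw [innB]
    by_cases hg : 0 < d ∧ j < n
    · rw [dif_pos hg]
      by_cases ho : lo.getD j 0 ≤ 0
      · rw [if_pos ho]
        refine ih (j+1) lo d m (by omega) ?_ (by omega)
        intro k hk
        rcases Nat.lt_or_ge k j with h | h
        · exact hpre k h
        · have : k = j := by omega
          simpa [this] using ho
      · rw [if_neg ho]
        by_cases hod : lo.getD j 0 ≤ d
        · rw [if_pos hod]
          have hpre' : ∀ k < j+1, (lo.set j 0).getD k 0 ≤ 0 := by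
            intro k hk
            rcases Nat.lt_or_ge k j with h | h
            · rw [List.getD_eq_getElem?_getD, List.getElem?_set_ne (by omega),
                  ← List.getD_eq_getElem?_getD]
              exact hpre k h
            · have hkj : k = j := by omega
              subst hkj
              by_cases hlen : k < lo.length
              · rw [getD_set_self lo k 0 hlen]
              · rw [List.set_eq_of_length_le (by omega)]
                rw [List.getD_eq_getElem?_getD, List.getElem?_eq_none (by omega)]
                simp
          have := ih (j+1) (lo.set j 0) (d - lo.getD j 0)
              (m ++ [pvFmt j i (lo.getD j 0)]) (by omega) hpre' (by omega)
          simpa [List.length_set] using this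
        · rw [if_neg hod]
          refine ⟨by simp, by exact (show j ≤ n by omega), ?_⟩
          intro k hk
          have hk' : k < j := hk
          rw [List.getD_eq_getElem?_getD, List.getElem?_set_ne (by omega),
              ← List.getD_eq_getElem?_getD]
          exact hpre k hk'
    · rw [dif_neg hg]
      exact ⟨rfl, hj, hpre⟩

theorem outA_eq_outB : ∀ (fuel i j : Nat) (lo ld : List Int) (m : List String),
    ld.length - i = fuel → j ≤ lo.length → (∀ k < j, lo.getD k 0 ≤ 0) →
    outA ld.length i lo ld m = outB lo j i (ld.drop i) m := by
  intro fuel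
  induction fuel with
  | zero =>
    intro i j lo ld m hf hj hpre
    rw [outA, dif_neg (by omega), List.drop_eq_nil_of_le (by omega)]
    rfl
  | succ t ih =>
    intro i j lo ld m hf hj hpre
    have hi : i < ld.length := by omega
    have hdrop : ld.drop i = ld.getD i 0 :: ld.drop (i+1) := by
      rw [List.drop_eq_getElem_cons hi, List.getD_eq_getElem ld 0 hi]
    rw [outA, dif_pos hi]
    simp only []
    rw [innA_skip_many lo.length i j lo ld m hj hpre,
        innA_eq_innB lo.length i j lo ld m hi]
    obtain ⟨hlen, hle, hpre'⟩ :=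
      innB_inv lo.length i (lo.length - j) j lo (ld.getD i 0) m rfl hpre hj
    rw [hdrop]
    conv_rhs => rw [outB]
    simp only []
    have hnd : ld.length = (ld.set i (innB lo.length i lo j (ld.getD i 0) m).2.2.1).length := by
      simp
    rw [hnd,
        ih (i+1) (innB lo.length i lo j (ld.getD i 0) m).2.1
          (innB lo.length i lo j (ld.getD i 0) m).1
          (ld.set i (innB lo.length i lo j (ld.getD i 0) m).2.2.1)
          (innB lo.length i lo j (ld.getD i 0) m).2.2.2
          (by simp; omega) (by omega) hpre',
        drop_set_of_lt _ _ _ _ (by omega)]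

-- ===== VERDICT (by name: the statement is the Claim_ definition above) =====
theorem resolverProblema_spec : Claim_equal_resolverProblema := by
  intro lo ld _
  unfold Spec_resolverProblema resolverProblema resolverProblema_alt
  simpa using outA_eq_outB ld.length 0 0 lo ld [] rfl (Nat.zero_le _) (by omega)
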